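-- pv_equiv track=rewrite | github.com/kelvinchildress-coder/academic-personalization-assistant | scripts/summer_roster_refresh.py | _build_diff_text
-- ===== SOURCE A (Python) =====
-- from typing import Any, Dict, List, Optional
--
-- def _build_diff_text(old: Dict[str, Any], new: Dict[str, Any]) -> str:
--     old_coaches = set((old.get("coaches") or {}).keys())
--     new_coaches = set((new.get("coaches") or {}).keys())
--     added_coaches = sorted(new_coaches - old_coaches)
--     removed_coaches = sorted(old_coaches - new_coaches)
--     lines = []
--     if added_coaches:
--         lines.append(f"+ Coaches added: {', '.join(added_coaches)}")
--     if removed_coaches: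
--         lines.append(f"- Coaches removed: {', '.join(removed_coaches)}")
--
--     old_students_map = {s: c for c, ss in (old.get("coaches") or {}).items() for s in (ss or [])}
--     new_students_map = {s: c for c, ss in (new.get("coaches") or {}).items() for s in (ss or [])}
--     added_students = sorted(set(new_students_map) - set(old_students_map))
--     removed_students = sorted(set(old_students_map) - set(new_students_map))
--     moved = sorted(
--         s for s in (set(old_students_map) & set(new_students_map))
--         if old_students_map[s] != new_students_map[s]
--     )
--     if added_students:
--         lines.append(f"+ Students added: {', '.join(added_students)}")
--     if removed_students:
--         lines.append(f"- Students removed: {', '.join(removed_students)}")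
--     for s in moved:
--         lines.append(f"~ {s}: {old_students_map[s]} -> {new_students_map[s]}")
--     if not lines:
--         lines.append("(no changes detected)")
--     return "\n".join(lines)
-- ===== SOURCE B (Python) =====
-- def _merge2(olds, news):
--     # merge-join of two strictly sorted key lists -> (only-in-news, only-in-olds)
--     added, removed = [], []
--     i = j = 0
--     while i < len(olds) and j < len(news):
--         if olds[i] < news[j]:
--             removed.append(olds[i]); i += 1
--         elif news[j] < olds[i]:
--             added.append(news[j]); j += 1
--         else:
--             i += 1; j += 1
--     removed.extend(olds[i:])
--     added.extend(news[j:])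
--     return added, removed
--
--
-- def _merge3(olds, news):
--     # merge-join of two item lists strictly sorted by key ->
--     # (keys only in news, keys only in olds, (key, old_val, new_val) where values differ)
--     added, removed, moved = [], [], []
--     i = j = 0
--     while i < len(olds) and j < len(news):
--         s1, c1 = olds[i]
--         s2, c2 = news[j]
--         if s1 < s2:
--             removed.append(s1); i += 1
--         elif s2 < s1:
--             added.append(s2); j += 1
--         else:
--             if c1 != c2:
--                 moved.append((s1, c1, c2))
--             i += 1; j += 1
--     removed.extend(s for s, _ in olds[i:])
--     added.extend(s for s, _ in news[j:])
--     return added, removed, moved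
--
--
-- def _build_diff_text(old, new):
--     oc = old.get("coaches") or {}
--     nc = new.get("coaches") or {}
--     om = {s: c for c, ss in oc.items() for s in (ss or [])}
--     nm = {s: c for c, ss in nc.items() for s in (ss or [])}
--
--     lines = []
--     ca, cr = _merge2(sorted(oc), sorted(nc))
--     if ca:
--         lines.append("+ Coaches added: " + ", ".join(ca))
--     if cr:
--         lines.append("- Coaches removed: " + ", ".join(cr))
--     sa, sr, mv = _merge3(sorted(om.items(), key=lambda p: p[0]),
--                          sorted(nm.items(), key=lambda p: p[0]))
--     if sa:
--         lines.append("+ Students added: " + ", ".join(sa))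
--     if sr:
--         lines.append("- Students removed: " + ", ".join(sr))
--     for s, c1, c2 in mv:
--         lines.append(f"~ {s}: {c1} -> {c2}")
--     return "\n".join(lines) if lines else "(no changes detected)"
-- ===== Notes on version B (the rewrite author's own statement) =====
-- stated objective: alternative
-- what changed: A computes each diff section with set objects (set differences, intersection, membership tests) and sorts each result separately; B instead sorts the key/item lists once and computes added/removed/moved by a two-pointer merge join of the two sorted sequences, with no set objects and no membership tests.
import Mathlib
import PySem

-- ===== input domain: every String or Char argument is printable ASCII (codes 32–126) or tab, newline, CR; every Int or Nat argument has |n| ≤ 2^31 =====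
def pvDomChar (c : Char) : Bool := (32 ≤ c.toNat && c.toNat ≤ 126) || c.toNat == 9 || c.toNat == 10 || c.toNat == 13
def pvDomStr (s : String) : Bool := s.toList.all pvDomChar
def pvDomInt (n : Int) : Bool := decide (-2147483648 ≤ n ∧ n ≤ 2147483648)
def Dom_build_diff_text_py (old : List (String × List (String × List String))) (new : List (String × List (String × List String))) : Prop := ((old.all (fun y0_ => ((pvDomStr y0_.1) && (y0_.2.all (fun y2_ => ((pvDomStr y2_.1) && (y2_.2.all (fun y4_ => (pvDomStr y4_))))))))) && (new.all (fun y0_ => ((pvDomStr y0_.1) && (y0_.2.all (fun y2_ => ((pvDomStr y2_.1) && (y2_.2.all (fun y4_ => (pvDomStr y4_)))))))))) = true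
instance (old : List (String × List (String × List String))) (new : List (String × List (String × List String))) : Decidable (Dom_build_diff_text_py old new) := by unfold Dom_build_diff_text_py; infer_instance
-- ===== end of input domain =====

-- B replaces A's set-difference/intersection computations by a MERGE JOIN: it sorts the two key
-- (resp. item) lists once and walks both with two pointers, classifying each element as
-- added / removed / moved during the merge — no set objects and no membership tests (objective: alternative).

-- ===== PORT A =====
-- `old.get("coaches") or {}`: a missing key gives None -> {}, and an empty dict is already {}, so `.getD []` is exact.
-- `.items()` of a dict value is its pair list itself; `ss or []` is the identity on a list value.
def build_diff_text_py (old : List (String × List (String × List String))) (new : List (String × List (String × List String))) : String :=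
  let oc : List (String × List String) := ((PySem.Dict.mk old).get? "coaches").getD []
  let nc : List (String × List String) := ((PySem.Dict.mk new).get? "coaches").getD []
  let old_coaches : PySem.Set String := PySem.Set.ofList (PySem.Dict.mk oc).keys
  let new_coaches : PySem.Set String := PySem.Set.ofList (PySem.Dict.mk nc).keys
  let added_coaches := PySem.List.sorted (PySem.Set.diff new_coaches old_coaches) (fun x => x)
  let removed_coaches := PySem.List.sorted (PySem.Set.diff old_coaches new_coaches) (fun x => x)
  let lines : List String := []
  let lines := if added_coaches.isEmpty then lines else lines ++ ["+ Coaches added: " ++ PySem.Str.join ", " added_coaches]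
  let lines := if removed_coaches.isEmpty then lines else lines ++ ["- Coaches removed: " ++ PySem.Str.join ", " removed_coaches]
  -- {s: c for c, ss in oc.items() for s in (ss or [])} — last coach wins via insert overwrite
  let osm : PySem.Dict String String := oc.foldl (fun d p => p.2.foldl (fun d s => d.insert s p.1) d) PySem.Dict.empty
  let nsm : PySem.Dict String String := nc.foldl (fun d p => p.2.foldl (fun d s => d.insert s p.1) d) PySem.Dict.empty
  let added_students := PySem.List.sorted (PySem.Set.diff (PySem.Set.ofList nsm.keys) (PySem.Set.ofList osm.keys)) (fun x => x)
  let removed_students := PySem.List.sorted (PySem.Set.diff (PySem.Set.ofList osm.keys) (PySem.Set.ofList nsm.keys)) (fun x => x)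
  -- s is in both maps, so the [s] lookups cannot raise; getD is exact here
  let moved := PySem.List.sorted ((PySem.Set.inter (PySem.Set.ofList osm.keys) (PySem.Set.ofList nsm.keys)).filter
      (fun s => osm.getD s "" != nsm.getD s "")) (fun x => x)
  let lines := if added_students.isEmpty then lines else lines ++ ["+ Students added: " ++ PySem.Str.join ", " added_students]
  let lines := if removed_students.isEmpty then lines else lines ++ ["- Students removed: " ++ PySem.Str.join ", " removed_students]
  let lines := moved.foldl (fun ls s => ls ++ ["~ " ++ s ++ ": " ++ osm.getD s "" ++ " -> " ++ nsm.getD s ""]) lines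
  let lines := if lines.isEmpty then lines ++ ["(no changes detected)"] else lines
  PySem.Str.join "\n" lines

-- ===== PORT B =====
-- _merge2: the two-pointer while loop over two sorted key lists, as the obvious structural
-- recursion on the two lists (i/j advance = dropping the head); appends become conses in order.
def pvMerge2 : List String → List String → List String × List String
  | [], news => (news, [])
  | x :: xs, [] => ([], x :: xs)
  | x :: xs, y :: ys =>
    if x < y then
      let r := pvMerge2 xs (y :: ys)
      (r.1, x :: r.2)
    else if y < x then
      let r := pvMerge2 (x :: xs) ys
      (y :: r.1, r.2)
    else
      pvMerge2 xs ys
termination_by xs ys => xs.length + ys.length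
decreasing_by all_goals (simp only [List.length_cons]; omega)

-- _merge3: same two-pointer merge over item lists sorted by key
def pvMerge3 : List (String × String) → List (String × String) → List String × List String × List (String × String × String)
  | [], news => (news.map (·.1), [], [])
  | p :: xs, [] => ([], (p :: xs).map (·.1), [])
  | p :: xs, q :: ys =>
    if p.1 < q.1 then
      let r := pvMerge3 xs (q :: ys)
      (r.1, p.1 :: r.2.1, r.2.2)
    else if q.1 < p.1 then
      let r := pvMerge3 (p :: xs) ys
      (q.1 :: r.1, r.2.1, r.2.2)
    else
      let r := pvMerge3 xs ys
      if p.2 != q.2 then (r.1, r.2.1, (p.1, p.2, q.2) :: r.2.2) else r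
termination_by xs ys => xs.length + ys.length
decreasing_by all_goals (simp only [List.length_cons]; omega)

-- sorted(oc) iterates the dict's (distinct) keys: Set.ofList keys is that distinct-key view;
-- sorted(d.items(), key=...) sorts the item pairs by their first component.
def build_diff_text_py_alt (old : List (String × List (String × List String))) (new : List (String × List (String × List String))) : String :=
  let oc : List (String × List String) := ((PySem.Dict.mk old).get? "coaches").getD []
  let nc : List (String × List String) := ((PySem.Dict.mk new).get? "coaches").getD []
  let om : PySem.Dict String String := oc.foldl (fun d p => p.2.foldl (fun d s => d.insert s p.1) d) PySem.Dict.empty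
  let nm : PySem.Dict String String := nc.foldl (fun d p => p.2.foldl (fun d s => d.insert s p.1) d) PySem.Dict.empty
  let lines : List String := []
  let cres := pvMerge2 (PySem.List.sorted (PySem.Set.ofList (PySem.Dict.mk oc).keys) (fun x => x))
                       (PySem.List.sorted (PySem.Set.ofList (PySem.Dict.mk nc).keys) (fun x => x))
  let lines := if cres.1.isEmpty then lines else lines ++ ["+ Coaches added: " ++ PySem.Str.join ", " cres.1]
  let lines := if cres.2.isEmpty then lines else lines ++ ["- Coaches removed: " ++ PySem.Str.join ", " cres.2]
  let sres := pvMerge3 (PySem.List.sorted om.items (fun p => p.1)) (PySem.List.sorted nm.items (fun p => p.1))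
  let lines := if sres.1.isEmpty then lines else lines ++ ["+ Students added: " ++ PySem.Str.join ", " sres.1]
  let lines := if sres.2.1.isEmpty then lines else lines ++ ["- Students removed: " ++ PySem.Str.join ", " sres.2.1]
  let lines := sres.2.2.foldl (fun ls t => ls ++ ["~ " ++ t.1 ++ ": " ++ t.2.1 ++ " -> " ++ t.2.2]) lines
  if lines.isEmpty then "(no changes detected)" else PySem.Str.join "\n" lines

-- ===== PRECONDITION & SPEC =====
def Spec_build_diff_text_py (old : List (String × List (String × List String))) (new : List (String × List (String × List String))) (out : String) : Prop := out = build_diff_text_py_alt old new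
instance (old : List (String × List (String × List String))) (new : List (String × List (String × List String))) (out : String) : Decidable (Spec_build_diff_text_py old new out) := by unfold Spec_build_diff_text_py; infer_instance

-- ===== CLAIM (what is proved, stated in full; the proofs are below) =====
def Claim_equal_build_diff_text_py : Prop := ∀ (old : List (String × List (String × List String))) (new : List (String × List (String × List String))), Dom_build_diff_text_py old new → Spec_build_diff_text_py old new (build_diff_text_py old new)

-- ===== LEMMAS AND PROOFS =====

theorem pv_filter_notmem_cons {α : Type} [DecidableEq α] (l t : List α) (a : α)
    (h : ∀ z ∈ l, z ≠ a) :
    l.filter (fun z => decide (z ∉ a :: t)) = l.filter (fun z => decide (z ∉ t)) := by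
  apply List.filter_congr
  intro z hz
  simp [List.mem_cons, h z hz]

theorem pv_filter_cons_mem {α : Type} [DecidableEq α] (l m : List α) (a : α) (h : a ∈ m) :
    (a :: l).filter (fun z => decide (z ∉ m)) = l.filter (fun z => decide (z ∉ m)) := by
  simp [h]

theorem pv_filter_cons_not_mem {α : Type} [DecidableEq α] (l m : List α) (a : α) (h : a ∉ m) :
    (a :: l).filter (fun z => decide (z ∉ m)) = a :: l.filter (fun z => decide (z ∉ m)) := by
  simp [h]

theorem pv_merge2_eq : ∀ (xs ys : List String), xs.Pairwise (· < ·) → ys.Pairwise (· < ·) →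
    pvMerge2 xs ys = (ys.filter (fun z => decide (z ∉ xs)), xs.filter (fun z => decide (z ∉ ys))) := by
  intro xs ys
  induction xs, ys using pvMerge2.induct with
  | case1 news => intro _ _; simp [pvMerge2]
  | case2 x xs => intro _ _; simp [pvMerge2]
  | case3 x xs y ys h ih =>
    intro hx hy
    obtain ⟨hy1, hy2⟩ := List.pairwise_cons.mp hy
    have hne : ∀ z ∈ y :: ys, z ≠ x := by
      intro z hz
      rcases List.mem_cons.mp hz with rfl | hz
      · exact (ne_of_gt h)
      · exact ne_of_gt (lt_trans h (hy1 z hz))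
    have hnm : x ∉ y :: ys := fun hm => (hne x hm) rfl
    rw [pvMerge2, if_pos h, ih (List.Pairwise.of_cons hx) hy]
    rw [pv_filter_notmem_cons (y :: ys) xs x hne, pv_filter_cons_not_mem xs (y :: ys) x hnm]
  | case4 x xs y ys h h' ih =>
    intro hx hy
    obtain ⟨hx1, hx2⟩ := List.pairwise_cons.mp hx
    have hne : ∀ z ∈ x :: xs, z ≠ y := by
      intro z hz
      rcases List.mem_cons.mp hz with rfl | hz
      · exact (ne_of_gt h')
      · exact ne_of_gt (lt_trans h' (hx1 z hz))
    have hnm : y ∉ x :: xs := fun hm => (hne y hm) rfl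
    rw [pvMerge2, if_neg h, if_pos h', ih hx (List.Pairwise.of_cons hy)]
    rw [pv_filter_notmem_cons (x :: xs) ys y hne, pv_filter_cons_not_mem ys (x :: xs) y hnm]
  | case5 x xs y ys h h' ih =>
    intro hx hy
    have e : x = y := le_antisymm (not_lt.mp h') (not_lt.mp h)
    subst e
    obtain ⟨hx1, hx2⟩ := List.pairwise_cons.mp hx
    obtain ⟨hy1, hy2⟩ := List.pairwise_cons.mp hy
    rw [pvMerge2, if_neg h, if_neg h', ih hx2 hy2]
    rw [pv_filter_cons_mem ys (x :: xs) x List.mem_cons_self,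
        pv_filter_notmem_cons ys xs x (fun z hz => ne_of_gt (hy1 z hz)),
        pv_filter_cons_mem xs (x :: ys) x List.mem_cons_self,
        pv_filter_notmem_cons xs ys x (fun z hz => ne_of_gt (hx1 z hz))]

theorem pv_lookup_cons_ne {ν : Type} (k a : String) (b : ν) (l : List (String × ν)) (hne : k ≠ a) :
    List.lookup k ((a, b) :: l) = List.lookup k l := by
  have hb : (k == a) = false := beq_eq_false_iff_ne.mpr hne
  simp [List.lookup, hb]

theorem pv_lookup_cons_self {ν : Type} (a : String) (b : ν) (l : List (String × ν)) :
    List.lookup a ((a, b) :: l) = some b := by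
  simp [List.lookup]

theorem pv_lookup_eq_none {ν : Type} (k : String) (l : List (String × ν))
    (h : ∀ p ∈ l, k ≠ p.1) : List.lookup k l = none := by
  induction l with
  | nil => rfl
  | cons p t ih =>
    obtain ⟨a, b⟩ := p
    rw [pv_lookup_cons_ne k a b t (h (a, b) List.mem_cons_self)]
    exact ih (fun p hp => h p (List.mem_cons_of_mem _ hp))

theorem pv_fnc_map (l : List String) (p : String × String) (t : List (String × String))
    (h : ∀ z ∈ l, z ≠ p.1) :
    l.filter (fun z => decide (z ∉ (p :: t).map Prod.fst))
      = l.filter (fun z => decide (z ∉ t.map Prod.fst)) := by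
  apply List.filter_congr
  intro z hz
  simp [List.mem_cons, h z hz]

theorem pv_fcons_notmem_map (p : String × String) (t : List (String × String)) (m : List String)
    (h : p.1 ∉ m) :
    ((p :: t).map Prod.fst).filter (fun z => decide (z ∉ m))
      = p.1 :: (t.map Prod.fst).filter (fun z => decide (z ∉ m)) := by
  simp only [List.map_cons, List.filter_cons]
  simp [h]

theorem pv_fcons_mem_map (p : String × String) (t : List (String × String)) (m : List String)
    (h : p.1 ∈ m) :
    ((p :: t).map Prod.fst).filter (fun z => decide (z ∉ m))
      = (t.map Prod.fst).filter (fun z => decide (z ∉ m)) := by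
  simp only [List.map_cons, List.filter_cons]
  simp [h]

theorem pv_merge3_eq : ∀ (xs ys : List (String × String)),
    (xs.map Prod.fst).Pairwise (· < ·) → (ys.map Prod.fst).Pairwise (· < ·) →
    pvMerge3 xs ys = ((ys.map Prod.fst).filter (fun z => decide (z ∉ xs.map Prod.fst)),
                      (xs.map Prod.fst).filter (fun z => decide (z ∉ ys.map Prod.fst)),
                      xs.filterMap (fun p => (List.lookup p.1 ys).bind
                        (fun c => if p.2 ≠ c then some (p.1, p.2, c) else none))) := by
  intro xs ys
  induction xs, ys using pvMerge3.induct with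
  | case1 news => intro _ _; simp [pvMerge3]
  | case2 p xs => intro _ _; simp [pvMerge3]
  | case3 p xs q ys h ih =>
    intro hx hy
    have hx' := List.map_cons (f := Prod.fst) (a := p) (l := xs) ▸ hx
    have hy' := List.map_cons (f := Prod.fst) (a := q) (l := ys) ▸ hy
    obtain ⟨hy1, hy2⟩ := List.pairwise_cons.mp hy'
    have hne : ∀ z ∈ (q :: ys).map Prod.fst, z ≠ p.1 := by
      intro z hz
      rw [List.map_cons, List.mem_cons] at hz
      rcases hz with rfl | hz
      · exact (ne_of_gt h)
      · exact ne_of_gt (lt_trans h (hy1 z hz))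
    have hnm : p.1 ∉ (q :: ys).map Prod.fst := fun hm => (hne p.1 hm) rfl
    have hlk : List.lookup p.1 (q :: ys) = none := by
      apply pv_lookup_eq_none
      intro r hr
      rcases List.mem_cons.mp hr with rfl | hr
      · exact ne_of_lt h
      · exact ne_of_lt (lt_trans h (hy1 r.1 (List.mem_map_of_mem hr)))
    rw [pvMerge3, if_pos h, ih (List.Pairwise.of_cons hx) hy]
    rw [pv_fnc_map ((q :: ys).map Prod.fst) p xs hne]
    rw [pv_fcons_notmem_map p xs ((q :: ys).map Prod.fst) hnm]
    rw [List.filterMap_cons, hlk]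
    rfl
  | case4 p xs q ys h h' ih =>
    intro hx hy
    have hx' := List.map_cons (f := Prod.fst) (a := p) (l := xs) ▸ hx
    obtain ⟨hx1, hx2⟩ := List.pairwise_cons.mp hx'
    have hne : ∀ z ∈ (p :: xs).map Prod.fst, z ≠ q.1 := by
      intro z hz
      rw [List.map_cons, List.mem_cons] at hz
      rcases hz with rfl | hz
      · exact (ne_of_gt h')
      · exact ne_of_gt (lt_trans h' (hx1 z hz))
    have hnm : q.1 ∉ (p :: xs).map Prod.fst := fun hm => (hne q.1 hm) rfl
    have hcg : (p :: xs).filterMap (fun t => (List.lookup t.1 (q :: ys)).bind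
          (fun c => if t.2 ≠ c then some (t.1, t.2, c) else none))
        = (p :: xs).filterMap (fun t => (List.lookup t.1 ys).bind
          (fun c => if t.2 ≠ c then some (t.1, t.2, c) else none)) := by
      apply List.filterMap_congr
      intro t ht
      rw [show (q : String × String) = (q.1, q.2) from rfl,
          pv_lookup_cons_ne t.1 q.1 q.2 ys (hne t.1 (List.mem_map_of_mem ht))]
    rw [pvMerge3, if_neg h, if_pos h', ih hx (List.Pairwise.of_cons hy)]
    rw [pv_fnc_map ((p :: xs).map Prod.fst) q ys hne]
    rw [pv_fcons_notmem_map q ys ((p :: xs).map Prod.fst) hnm]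
    rw [hcg]
  | case5 p xs q ys h h' hb ih =>
    intro hx hy
    have e : p.1 = q.1 := le_antisymm (not_lt.mp h') (not_lt.mp h)
    have hv : p.2 ≠ q.2 := by simpa using hb
    have hx' := List.map_cons (f := Prod.fst) (a := p) (l := xs) ▸ hx
    have hy' := List.map_cons (f := Prod.fst) (a := q) (l := ys) ▸ hy
    obtain ⟨hx1, hx2⟩ := List.pairwise_cons.mp hx'
    obtain ⟨hy1, hy2⟩ := List.pairwise_cons.mp hy'
    have hlk : List.lookup p.1 (q :: ys) = some q.2 := by
      rw [show (q : String × String) = (q.1, q.2) from rfl, e, pv_lookup_cons_self]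
    have hcg : xs.filterMap (fun t => (List.lookup t.1 (q :: ys)).bind
          (fun c => if t.2 ≠ c then some (t.1, t.2, c) else none))
        = xs.filterMap (fun t => (List.lookup t.1 ys).bind
          (fun c => if t.2 ≠ c then some (t.1, t.2, c) else none)) := by
      apply List.filterMap_congr
      intro t ht
      rw [show (q : String × String) = (q.1, q.2) from rfl,
          pv_lookup_cons_ne t.1 q.1 q.2 ys (ne_of_gt (e ▸ hx1 t.1 (List.mem_map_of_mem ht)))]
    rw [pvMerge3, if_neg h, if_neg h', if_pos hb, ih hx2 hy2]
    rw [pv_fcons_mem_map q ys ((p :: xs).map Prod.fst) (by simp [← e])]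
    rw [pv_fnc_map (ys.map Prod.fst) p xs (fun z hz => ne_of_gt (e ▸ hy1 z hz))]
    rw [pv_fcons_mem_map p xs ((q :: ys).map Prod.fst) (by simp [e])]
    rw [pv_fnc_map (xs.map Prod.fst) q ys (fun z hz => ne_of_gt (e ▸ hx1 z hz))]
    rw [List.filterMap_cons, hlk, hcg]
    simp [hv]
  | case6 p xs q ys h h' hb ih =>
    intro hx hy
    have e : p.1 = q.1 := le_antisymm (not_lt.mp h') (not_lt.mp h)
    have hv : p.2 = q.2 := by simpa using hb
    have hx' := List.map_cons (f := Prod.fst) (a := p) (l := xs) ▸ hx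
    have hy' := List.map_cons (f := Prod.fst) (a := q) (l := ys) ▸ hy
    obtain ⟨hx1, hx2⟩ := List.pairwise_cons.mp hx'
    obtain ⟨hy1, hy2⟩ := List.pairwise_cons.mp hy'
    have hlk : List.lookup p.1 (q :: ys) = some q.2 := by
      rw [show (q : String × String) = (q.1, q.2) from rfl, e, pv_lookup_cons_self]
    have hcg : xs.filterMap (fun t => (List.lookup t.1 (q :: ys)).bind
          (fun c => if t.2 ≠ c then some (t.1, t.2, c) else none))
        = xs.filterMap (fun t => (List.lookup t.1 ys).bind
          (fun c => if t.2 ≠ c then some (t.1, t.2, c) else none)) := by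
      apply List.filterMap_congr
      intro t ht
      rw [show (q : String × String) = (q.1, q.2) from rfl,
          pv_lookup_cons_ne t.1 q.1 q.2 ys (ne_of_gt (e ▸ hx1 t.1 (List.mem_map_of_mem ht)))]
    rw [pvMerge3, if_neg h, if_neg h', if_neg (by simp [hv]), ih hx2 hy2]
    rw [pv_fcons_mem_map q ys ((p :: xs).map Prod.fst) (by simp [← e])]
    rw [pv_fnc_map (ys.map Prod.fst) p xs (fun z hz => ne_of_gt (e ▸ hy1 z hz))]
    rw [pv_fcons_mem_map p xs ((q :: ys).map Prod.fst) (by simp [e])]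
    rw [pv_fnc_map (xs.map Prod.fst) q ys (fun z hz => ne_of_gt (e ▸ hx1 z hz))]
    rw [List.filterMap_cons, hlk, hcg]
    simp [hv]

theorem pv_lookup_eq_some {ν : Type} (k : String) (v : ν) (l : List (String × ν))
    (hnd : (l.map Prod.fst).Nodup) (hmem : (k, v) ∈ l) : List.lookup k l = some v := by
  induction l with
  | nil => cases hmem
  | cons p t ih =>
    obtain ⟨a, b⟩ := p
    rw [List.map_cons] at hnd
    obtain ⟨hna, hnt⟩ := List.pairwise_cons.mp hnd
    rcases List.mem_cons.mp hmem with he | hm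
    · obtain ⟨rfl, rfl⟩ := Prod.mk.injEq .. ▸ he
      exact pv_lookup_cons_self k v t
    · have hka : k ≠ a := by
        rintro rfl
        exact hna k (List.mem_map_of_mem hm) rfl
      rw [pv_lookup_cons_ne k a b t hka]
      exact ih hnt hm

theorem pv_lookup_perm (d : PySem.Dict String String) (l : List (String × String))
    (hperm : l.Perm d.items) (hnd : d.keys.Nodup) (k : String) :
    List.lookup k l = d.get? k := by
  have hkeys : d.keys = d.items.map Prod.fst := rfl
  cases h : d.get? k with
  | none =>
    apply pv_lookup_eq_none
    intro p hp
    rintro rfl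
    have : p.1 ∈ d.keys := by
      rw [hkeys]
      exact List.mem_map_of_mem (hperm.mem_iff.mp hp)
    rw [PySem.Dict.get?_eq_none_iff_not_mem_keys] at h
    exact h this
  | some v =>
    apply pv_lookup_eq_some
    · exact ((hperm.map Prod.fst).nodup_iff).mpr (hkeys ▸ hnd)
    · exact hperm.mem_iff.mpr (PySem.Dict.mem_items_of_get?_eq_some d h)

theorem pv_filterMap_eq {α : Type} (xs : List (String × String))
    (f : String × String → Option α) (q : String → Bool) (g : String → α)
    (h : ∀ p ∈ xs, f p = if q p.1 then some (g p.1) else none) :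
    xs.filterMap f = ((xs.map Prod.fst).filter q).map g := by
  induction xs with
  | nil => rfl
  | cons p t ih =>
    rw [List.filterMap_cons, h p List.mem_cons_self, List.map_cons, List.filter_cons]
    cases hq : q p.1 with
    | true => simp only [ih (fun p hp => h p (List.mem_cons_of_mem _ hp))]; simp
    | false => simp only [Bool.false_eq_true, if_false, ih (fun p hp => h p (List.mem_cons_of_mem _ hp))]

theorem pv_nodup_build (l : List (String × List String)) (d : PySem.Dict String String)
    (h : d.keys.Nodup) :
    (l.foldl (fun d p => p.2.foldl (fun d s => d.insert s p.1) d) d).keys.Nodup := by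
  induction l generalizing d with
  | nil => exact h
  | cons p t ih =>
    exact ih _ (PySem.Dict.nodup_keys_foldl_insert p.2 (fun _ _ => p.1) d h)

theorem pv_map_fst_sorted (d : PySem.Dict String String) (hnd : d.keys.Nodup) :
    (PySem.List.sorted d.items (fun p => p.1)).map Prod.fst
      = PySem.List.sorted (PySem.Set.ofList d.keys) (fun x => x) := by
  have hkeys : d.keys = d.items.map Prod.fst := rfl
  have hperm : ((PySem.List.sorted d.items (fun p => p.1)).map Prod.fst).Perm d.keys := by
    rw [hkeys]
    exact (PySem.List.sorted_perm d.items (fun p => p.1) false).map Prod.fst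
  have hnd' : ((PySem.List.sorted d.items (fun p => p.1)).map Prod.fst).Nodup :=
    hperm.nodup_iff.mpr hnd
  have hle : ((PySem.List.sorted d.items (fun p => p.1)).map Prod.fst).Pairwise (· ≤ ·) :=
    List.pairwise_map.mpr (PySem.List.sorted_pairwise d.items (fun p => p.1))
  refine Eq.symm (PySem.List.sorted_eq_of_perm_of_pairwise_lt _ _ _ ?_ ?_)
  · rw [PySem.Set.ofList_eq_self_of_nodup _ hnd]
    exact hperm
  · exact (hle.and hnd').imp (fun hab => lt_of_le_of_ne hab.1 hab.2)

theorem pv_char (W Z : List String) (p : String → Bool)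
    (hnd : Z.Nodup) (hmem : ∀ x, x ∈ Z ↔ x ∈ W ∧ p x = true) :
    PySem.List.sorted Z (fun x => x)
      = (PySem.List.sorted (PySem.Set.ofList W) (fun x => x)).filter p := by
  have hsnd : (PySem.List.sorted (PySem.Set.ofList W) (fun x => x)).Nodup :=
    (PySem.List.sorted_perm _ _ _).nodup_iff.mpr (PySem.Set.nodup_ofList _)
  apply PySem.List.sorted_eq_of_perm_of_pairwise_lt
  · refine (List.perm_ext_iff_of_nodup (hsnd.filter p) hnd).mpr ?_
    intro x
    simp only [List.mem_filter, PySem.List.mem_sorted, PySem.Set.mem_ofList, hmem]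
  · exact (PySem.List.sorted_ofList_pairwise_lt W).filter p

-- the two fallback shapes agree: join of [msg] is msg
theorem pv_final_eq (L : List String) :
    PySem.Str.join "\n" (if L.isEmpty then L ++ ["(no changes detected)"] else L)
      = (if L.isEmpty then "(no changes detected)" else PySem.Str.join "\n" L) := by
  cases L with
  | nil => decide
  | cons x t => simp

-- ===== VERDICT (by name: the statement is the Claim_ definition above) =====
theorem build_diff_text_py_spec : Claim_equal_build_diff_text_py := by
  intro old new _
  unfold Spec_build_diff_text_py
  simp only [build_diff_text_py, build_diff_text_py_alt]
  set oc := ((PySem.Dict.mk old).get? "coaches").getD [] with hoc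
  set nc := ((PySem.Dict.mk new).get? "coaches").getD [] with hnc
  set om := oc.foldl (fun d p => p.2.foldl (fun d s => d.insert s p.1) d) PySem.Dict.empty with hom
  set nm := nc.foldl (fun d p => p.2.foldl (fun d s => d.insert s p.1) d) PySem.Dict.empty with hnm
  have hndo : om.keys.Nodup := hom ▸ pv_nodup_build oc PySem.Dict.empty PySem.Dict.nodup_keys_empty
  have hndn : nm.keys.Nodup := hnm ▸ pv_nodup_build nc PySem.Dict.empty PySem.Dict.nodup_keys_empty
  have ho := pv_map_fst_sorted om hndo
  have hn := pv_map_fst_sorted nm hndn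
  have hpo : ((PySem.List.sorted om.items (fun p => p.1)).map Prod.fst).Pairwise (· < ·) := by
    rw [ho]; exact PySem.List.sorted_ofList_pairwise_lt _
  have hpn : ((PySem.List.sorted nm.items (fun p => p.1)).map Prod.fst).Pairwise (· < ·) := by
    rw [hn]; exact PySem.List.sorted_ofList_pairwise_lt _
  rw [pv_merge2_eq _ _ (PySem.List.sorted_ofList_pairwise_lt _) (PySem.List.sorted_ofList_pairwise_lt _)]
  rw [pv_merge3_eq _ _ hpo hpn]
  have hf : ∀ p ∈ PySem.List.sorted om.items (fun p => p.1),
      (List.lookup p.1 (PySem.List.sorted nm.items (fun p => p.1))).bind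
          (fun c => if p.2 ≠ c then some (p.1, p.2, c) else none)
        = if nm.contains p.1 && (om.getD p.1 "" != nm.getD p.1 "")
            then some (p.1, om.getD p.1 "", nm.getD p.1 "") else none := by
    intro p hp
    have hpi : p ∈ om.items := (PySem.List.mem_sorted _ _ _ _).mp hp
    have hgetd : om.getD p.1 "" = p.2 :=
      PySem.Dict.getD_of_mem_items om (by rw [Prod.mk.eta]; exact hpi) hndo ""
    have hlkp : List.lookup p.1 (PySem.List.sorted nm.items (fun p => p.1)) = nm.get? p.1 :=
      pv_lookup_perm nm _ (PySem.List.sorted_perm _ _ _) hndn p.1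
    rw [hlkp]
    cases hg : nm.get? p.1 with
    | none =>
      have hc : nm.contains p.1 = false := by
        rw [PySem.Dict.contains_eq_isSome_get?, hg]; rfl
      simp [hc]
    | some c =>
      have hc : nm.contains p.1 = true := by
        rw [PySem.Dict.contains_eq_isSome_get?, hg]; rfl
      have hgd : nm.getD p.1 "" = c := by
        rw [PySem.Dict.getD_eq_get?_getD, hg]; rfl
      rw [hgetd, hgd, hc]
      by_cases hv : p.2 = c
      · simp [hv]
      · simp [hv]
  rw [pv_filterMap_eq (PySem.List.sorted om.items (fun p => p.1)) _
        (fun s => nm.contains s && (om.getD s "" != nm.getD s ""))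
        (fun s => (s, om.getD s "", nm.getD s "")) hf]
  rw [ho, hn]
  have e1 : PySem.List.sorted (PySem.Set.diff (PySem.Set.ofList (PySem.Dict.mk nc).keys)
        (PySem.Set.ofList (PySem.Dict.mk oc).keys)) (fun x => x)
      = (PySem.List.sorted (PySem.Set.ofList (PySem.Dict.mk nc).keys) (fun x => x)).filter
          (fun z => decide (z ∉ PySem.List.sorted (PySem.Set.ofList (PySem.Dict.mk oc).keys) (fun x => x))) := by
    apply pv_char
    · exact PySem.Set.nodup_diff _ _ (PySem.Set.nodup_ofList _)
    · intro x
      simp only [PySem.Set.mem_diff, PySem.Set.mem_ofList, PySem.List.mem_sorted, decide_eq_true_eq]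
  have e2 : PySem.List.sorted (PySem.Set.diff (PySem.Set.ofList (PySem.Dict.mk oc).keys)
        (PySem.Set.ofList (PySem.Dict.mk nc).keys)) (fun x => x)
      = (PySem.List.sorted (PySem.Set.ofList (PySem.Dict.mk oc).keys) (fun x => x)).filter
          (fun z => decide (z ∉ PySem.List.sorted (PySem.Set.ofList (PySem.Dict.mk nc).keys) (fun x => x))) := by
    apply pv_char
    · exact PySem.Set.nodup_diff _ _ (PySem.Set.nodup_ofList _)
    · intro x
      simp only [PySem.Set.mem_diff, PySem.Set.mem_ofList, PySem.List.mem_sorted, decide_eq_true_eq]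
  have e3 : PySem.List.sorted (PySem.Set.diff (PySem.Set.ofList nm.keys)
        (PySem.Set.ofList om.keys)) (fun x => x)
      = (PySem.List.sorted (PySem.Set.ofList nm.keys) (fun x => x)).filter
          (fun z => decide (z ∉ PySem.List.sorted (PySem.Set.ofList om.keys) (fun x => x))) := by
    apply pv_char
    · exact PySem.Set.nodup_diff _ _ (PySem.Set.nodup_ofList _)
    · intro x
      simp only [PySem.Set.mem_diff, PySem.Set.mem_ofList, PySem.List.mem_sorted, decide_eq_true_eq]
  have e4 : PySem.List.sorted (PySem.Set.diff (PySem.Set.ofList om.keys)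
        (PySem.Set.ofList nm.keys)) (fun x => x)
      = (PySem.List.sorted (PySem.Set.ofList om.keys) (fun x => x)).filter
          (fun z => decide (z ∉ PySem.List.sorted (PySem.Set.ofList nm.keys) (fun x => x))) := by
    apply pv_char
    · exact PySem.Set.nodup_diff _ _ (PySem.Set.nodup_ofList _)
    · intro x
      simp only [PySem.Set.mem_diff, PySem.Set.mem_ofList, PySem.List.mem_sorted, decide_eq_true_eq]
  have e5 : PySem.List.sorted ((PySem.Set.inter (PySem.Set.ofList om.keys)
          (PySem.Set.ofList nm.keys)).filter (fun s => om.getD s "" != nm.getD s "")) (fun x => x)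
      = (PySem.List.sorted (PySem.Set.ofList om.keys) (fun x => x)).filter
          (fun s => nm.contains s && (om.getD s "" != nm.getD s "")) := by
    apply pv_char
    · exact (PySem.Set.nodup_inter _ _ (PySem.Set.nodup_ofList _)).filter _
    · intro x
      simp only [List.mem_filter, PySem.Set.mem_inter, PySem.Set.mem_ofList, Bool.and_eq_true,
        PySem.Dict.contains_iff_mem_keys]
      tauto
  rw [e1, e2, e3, e4, e5]
  rw [PySem.List.foldl_append_singleton_eq_map, PySem.List.foldl_append_singleton_eq_map, List.map_map]
  exact pv_final_eq _
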